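-- pv_equiv track=rewrite | github.com/qeedquan/challenges | codewars/most-consecutive-0s-in-a-row-code-golf.py | f
-- ===== SOURCE A (Python) =====
-- def f(n):
--     if n < 0:
--         n = abs(n)
--     if n == 0:
--         return 1
--
--     m = 0
--     z = 0
--     while n != 0:
--         if n%10 == 0:
--             z += 1
--         else:
--             z = 0
--         m = max(m, z)
--         n //= 10
--     return m
-- ===== SOURCE B (Python) =====
-- def f(n):
--     # longest run of consecutive 0 digits = largest k with '0'*k a substring of str(abs(n))
--     s = str(abs(n))
--     k = 0
--     while "0" * (k + 1) in s:
--         k += 1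
--     return k
-- ===== Notes on version B (the rewrite author's own statement) =====
-- stated objective: idiomatic
-- what changed: Replaces A's reset-counter loop over the digits by a string algorithm: the answer is the largest k such that '0'*k is a substring of str(abs(n)), found by growing a zero-block while it still occurs; A's special case for a zero argument falls out of the substring test naturally.
import Mathlib
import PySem

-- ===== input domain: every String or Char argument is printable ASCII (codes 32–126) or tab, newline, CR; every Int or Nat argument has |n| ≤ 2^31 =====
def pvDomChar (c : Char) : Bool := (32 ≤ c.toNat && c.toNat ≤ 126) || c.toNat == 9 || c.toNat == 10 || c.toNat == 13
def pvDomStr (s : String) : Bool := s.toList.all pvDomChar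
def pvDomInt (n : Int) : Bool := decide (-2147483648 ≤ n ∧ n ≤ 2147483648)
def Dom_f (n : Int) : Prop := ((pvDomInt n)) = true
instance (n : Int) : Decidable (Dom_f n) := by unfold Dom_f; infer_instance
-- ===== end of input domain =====

-- B replaces A's reset-counter digit loop by a string algorithm: the answer is the largest k
-- with '0'*k a substring of str(abs(n)) (alternative decomposition, no speed claim).

-- ===== PORT A =====
-- A's while loop only ever runs with n ≥ 0 (after abs), so its state is carried as Nat:
-- on nonnegative values Nat % and / coincide exactly with Python's % and //.
def fLoop (n : Nat) (m z : Int) : Int :=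
  if h : n ≠ 0 then
    let z' : Int := if n % 10 = 0 then z + 1 else 0
    let m' := max m z'
    fLoop (n / 10) m' z'
  else m
termination_by n
decreasing_by exact Nat.div_lt_self (Nat.pos_of_ne_zero h) (by norm_num)

def f (n : Int) : Int :=
  let n' := if n < 0 then |n| else n
  if n' = 0 then 1
  else fLoop n'.toNat 0 0

-- ===== PORT B =====
-- termination fact for B's while loop, cited by bGrow's decreasing_by:
-- if '0'*(k+1) occurs in s then k+1 ≤ len(s)
theorem bGrow_dec (s : List Char) (k : Nat)
    (h : PySem.Chars.isIn (List.replicate (k + 1) '0') s = true) :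
    s.length + 1 - (k + 1) < s.length + 1 - k := by
  have hinf := (PySem.Chars.isIn_iff_infix _ _).mp h
  have := hinf.length_le
  simp [List.length_replicate] at this
  omega

-- `k = 0; while "0" * (k + 1) in s: k += 1; return k` — Python's k is a nonnegative int
-- throughout, carried as Nat; "0" * (k+1) is List.replicate (k+1) '0' (exact for k ≥ 0),
-- and `in` on strings is PySem.Chars.isIn on the code points.
def bGrow (s : List Char) (k : Nat) : Nat :=
  if h : PySem.Chars.isIn (List.replicate (k + 1) '0') s = true then bGrow s (k + 1) else k
termination_by s.length + 1 - k
decreasing_by exact bGrow_dec s k h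

def f_alt (n : Int) : Int :=
  let s := PySem.Int.toStr |n|     -- s = str(abs(n))
  (bGrow s.toList 0 : Int)

-- ===== PRECONDITION & SPEC =====
def Spec_f (n : Int) (out : Int) : Prop := out = f_alt n
instance (n : Int) (out : Int) : Decidable (Spec_f n out) := by unfold Spec_f; infer_instance

-- ===== CLAIM (what is proved, stated in full; the proofs are below) =====
def Claim_equal_f : Prop := ∀ (n : Int), Dom_f n → Spec_f n (f n)

-- ===== LEMMAS AND PROOFS =====

-- digit characters of n, least-significant first (always nonempty: chD 0 = ['0'])
def chD (n : Nat) : List Char :=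
  if h : n / 10 = 0 then [Nat.digitChar (n % 10)]
  else Nat.digitChar (n % 10) :: chD (n / 10)
termination_by n
decreasing_by exact Nat.div_lt_self (Nat.pos_of_ne_zero (fun h0 => h (by simp [h0]))) (by norm_num)

theorem toDigitsCore_eq (fuel : Nat) : ∀ (n : Nat) (l : List Char), 0 < fuel → n < 10 ^ fuel →
    Nat.toDigitsCore 10 fuel n l = (chD n).reverse ++ l := by
  induction fuel with
  | zero => intro n l h; omega
  | succ fuel ih =>
    intro n l _ hlt
    by_cases h10 : n / 10 = 0
    · rw [chD, dif_pos h10]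
      simp [Nat.toDigitsCore, h10]
    · rw [chD, dif_neg h10]
      have hf : 0 < fuel := by
        rcases Nat.eq_zero_or_pos fuel with hf0 | hf
        · subst hf0
          have : n < 10 := by simpa using hlt
          exact absurd (Nat.div_eq_of_lt this) h10
        · exact hf
      have hdiv : n / 10 < 10 ^ fuel := by
        apply Nat.div_lt_of_lt_mul
        calc n < 10 ^ (fuel + 1) := hlt
          _ = 10 * 10 ^ fuel := by ring
      have : Nat.toDigitsCore 10 (fuel + 1) n l
          = Nat.toDigitsCore 10 fuel (n / 10) (Nat.digitChar (n % 10) :: l) := by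
        simp only [Nat.toDigitsCore]
        rw [if_neg h10]
      rw [this, ih (n / 10) _ hf hdiv]
      simp

theorem toChars_natCast (m : Nat) : PySem.Int.toChars (m : Int) = (chD m).reverse := by
  have h1 : Nat.toDigits 10 m = Nat.toDigitsCore 10 (m + 1) m [] := rfl
  have hm : m < 10 ^ (m + 1) :=
    lt_of_lt_of_le Nat.lt_two_pow_self
      (le_trans (Nat.pow_le_pow_left (by norm_num) m) (Nat.pow_le_pow_right (by norm_num) (by omega)))
  have := toDigitsCore_eq (m + 1) m [] (by omega) hm
  simp only [PySem.Int.toChars, if_neg (by omega : ¬ ((m : Int) < 0)), Int.toNat_natCast,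
    h1, this]
  simp

-- length of the leading run of c, and the longest run of c, in a char list
def lead (c : Char) : List Char → Nat
  | [] => 0
  | x :: t => if x = c then lead c t + 1 else 0

def mr (c : Char) : List Char → Nat
  | [] => 0
  | x :: t => max (lead c (x :: t)) (mr c t)

theorem lead_le_mr (c : Char) (l : List Char) : lead c l ≤ mr c l := by
  cases l with
  | nil => exact le_refl 0
  | cons x t => exact le_max_left _ _

-- '0'*j is a prefix of l iff j ≤ length of l's leading zero-run
theorem replicate_prefix_iff (c : Char) (l : List Char) : ∀ j : Nat,
    (List.replicate j c <+: l ↔ j ≤ lead c l) := by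
  induction l with
  | nil =>
    intro j
    cases j with
    | zero => simp [lead]
    | succ j => simp [List.replicate_succ, lead]
  | cons x t ih =>
    intro j
    cases j with
    | zero => simp
    | succ j =>
      rw [List.replicate_succ, List.cons_prefix_cons]
      by_cases hx : x = c
      · simp only [lead, if_pos hx, ih j]
        constructor
        · rintro ⟨-, h⟩; omega
        · intro h; exact ⟨hx.symm, by omega⟩
      · simp only [lead, if_neg hx]
        constructor
        · rintro ⟨hc, -⟩; exact absurd hc.symm hx
        · omega

-- '0'*j is a substring of l iff j ≤ the longest zero-run of l
theorem replicate_infix_iff (c : Char) (l : List Char) : ∀ j : Nat,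
    (List.replicate j c <:+: l ↔ j ≤ mr c l) := by
  induction l with
  | nil =>
    intro j
    cases j with
    | zero => simp [mr]
    | succ j => simp [List.replicate_succ, mr]
  | cons x t ih =>
    intro j
    rw [List.infix_cons_iff, replicate_prefix_iff, ih, mr]
    omega

theorem mr_reverse (c : Char) (l : List Char) : mr c l.reverse = mr c l := by
  have key : ∀ j : Nat, j ≤ mr c l.reverse ↔ j ≤ mr c l := by
    intro j
    rw [← replicate_infix_iff, ← replicate_infix_iff, ← List.reverse_infix,
      List.reverse_replicate, List.reverse_reverse]
  exact le_antisymm ((key _).mp (le_refl _)) ((key _).mpr (le_refl _))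

-- A's loop, abstracted to the digit-character list
def runC : List Char → Int → Int → Int
  | [], m, _ => m
  | x :: t, m, z =>
    let z' : Int := if x = '0' then z + 1 else 0
    runC t (max m z') z'

theorem digitChar_eq_zero (d : Nat) (hd : d < 10) : (Nat.digitChar d = '0') ↔ d = 0 := by
  interval_cases d <;> simp [Nat.digitChar]

theorem fLoop_eq_runC (n : Nat) (hn : n ≠ 0) (m z : Int) : fLoop n m z = runC (chD n) m z := by
  rw [fLoop, dif_pos hn, chD]
  have hif : (if Nat.digitChar (n % 10) = '0' then z + 1 else 0)
      = (if n % 10 = 0 then z + 1 else 0) := by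
    by_cases h : n % 10 = 0
    · rw [if_pos h, if_pos ((digitChar_eq_zero _ (Nat.mod_lt _ (by norm_num))).mpr h)]
    · rw [if_neg h, if_neg (fun hc => h ((digitChar_eq_zero _ (Nat.mod_lt _ (by norm_num))).mp hc))]
  by_cases h10 : n / 10 = 0
  · rw [dif_pos h10, h10]
    simp only [runC, hif]
    rw [fLoop]
    simp
  · rw [dif_neg h10]
    simp only [runC, hif]
    exact fLoop_eq_runC (n / 10) h10 _ _
termination_by n
decreasing_by exact Nat.div_lt_self (Nat.pos_of_ne_zero hn) (by norm_num)

-- the invariant of A's fold: with 0 ≤ z ≤ m it computes max(m, z + leading run, longest run)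
theorem runC_invariant (l : List Char) : ∀ (m z : Int), 0 ≤ z → z ≤ m →
    runC l m z = max m (max (z + (lead '0' l : Nat)) ((mr '0' l : Nat))) := by
  induction l with
  | nil =>
    intro m z hz hzm
    simp only [runC, lead, mr]
    omega
  | cons x t ih =>
    intro m z hz hzm
    by_cases hx : x = '0'
    · simp only [runC, if_pos hx, lead, mr]
      rw [ih (max m (z + 1)) (z + 1) (by omega) (le_max_right _ _)]
      have hlm := lead_le_mr '0' t
      push_cast
      omega
    · simp only [runC, if_neg hx, lead, mr]
      rw [ih (max m 0) 0 (le_refl 0) (le_max_right _ _)]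
      have hlm := lead_le_mr '0' t
      push_cast
      omega

theorem runC_eq_mr (l : List Char) : runC l 0 0 = (mr '0' l : Nat) := by
  rw [runC_invariant l 0 0 (le_refl 0) (le_refl 0)]
  have := lead_le_mr '0' l
  omega

-- B's loop computes the longest zero-run, from any start k below it
theorem bGrow_eq_mr (s : List Char) (k : Nat) (hk : k ≤ mr '0' s) : bGrow s k = mr '0' s := by
  rw [bGrow]
  by_cases h : PySem.Chars.isIn (List.replicate (k + 1) '0') s = true
  · rw [dif_pos h]
    have hk1 : k + 1 ≤ mr '0' s :=
      (replicate_infix_iff '0' s (k + 1)).mp ((PySem.Chars.isIn_iff_infix _ _).mp h)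
    exact bGrow_eq_mr s (k + 1) hk1
  · rw [dif_neg h]
    have : ¬ (List.replicate (k + 1) '0' <:+: s) :=
      fun hc => h ((PySem.Chars.isIn_iff_infix _ _).mpr hc)
    rw [replicate_infix_iff] at this
    omega
termination_by s.length + 1 - k
decreasing_by exact bGrow_dec s k h

-- f_alt computes the longest zero-run of the digit list of |n|
theorem f_alt_eq (n : Int) : f_alt n = (mr '0' (chD n.natAbs) : Nat) := by
  have habs : |n| = (n.natAbs : Int) := Int.abs_eq_natAbs n
  simp only [f_alt, habs, PySem.Int.toList_toStr, toChars_natCast]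
  rw [bGrow_eq_mr _ 0 (Nat.zero_le _), mr_reverse]

-- ===== VERDICT (by name: the statement is the Claim_ definition above) =====
theorem f_spec : Claim_equal_f := by
  intro n _
  unfold Spec_f
  rw [f_alt_eq]
  unfold f
  have hif : (if n < 0 then |n| else n) = (n.natAbs : Int) := by
    rcases lt_or_ge n 0 with h | h
    · rw [if_pos h, Int.abs_eq_natAbs]
    · rw [if_neg (not_lt.mpr h)]; omega
  simp only [hif, Int.toNat_natCast, Nat.cast_eq_zero]
  by_cases h0 : n.natAbs = 0
  · rw [if_pos (by exact_mod_cast congrArg (Nat.cast : Nat → Int) h0), h0]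
    have : chD 0 = ['0'] := by rw [chD]; simp [Nat.digitChar]
    rw [this]
    simp [mr, lead]
  · rw [if_neg (by exact_mod_cast fun h => h0 (by exact_mod_cast h)), fLoop_eq_runC _ h0,
      runC_eq_mr]
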